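-- pv_equiv track=rewrite | github.com/GreenSheep-Studio/PythonLearning | ReverseAdd.py | ReverseAdd
-- ===== SOURCE A (Python) =====
-- def ReverseAdd(In_Num):
--     Sum = 0
--     n = 0
--     for i in In_Num:
--         if i > '9' or i < '0':
--             return "err"
--         else:
--             Sum += int(i) * (10 ** n)
--             n += 1
--     Sum += int(In_Num)
--     Sum = "{:,}".format(Sum)
--     return Sum
-- ===== SOURCE B (Python) =====
-- def ReverseAdd(In_Num):
--     if any(c < '0' or '9' < c for c in In_Num):
--         return "err"
--     rev = 0
--     for c in reversed(In_Num):
--         rev = rev * 10 + (ord(c) - 48)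
--     return "{:,}".format(rev + int(In_Num))
-- ===== Notes on version B (the rewrite author's own statement) =====
-- stated objective: simpler
-- what changed: A interleaves digit validation with a positional accumulation (Sum += int(i)*10**n, recomputing a power and a position counter each step) and an early return; B first validates with any(), then computes the reversed value by a single Horner pass over the reversed string (rev = rev*10 + digit) and adds int(In_Num) -- no power computation, no position counter. Pre_ excludes only the empty string, where both A and B raise ValueError from int('').
-- outside the precondition, e.g. on ReverseAdd(''): A raises ValueError, B raises ValueError
import Mathlib
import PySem

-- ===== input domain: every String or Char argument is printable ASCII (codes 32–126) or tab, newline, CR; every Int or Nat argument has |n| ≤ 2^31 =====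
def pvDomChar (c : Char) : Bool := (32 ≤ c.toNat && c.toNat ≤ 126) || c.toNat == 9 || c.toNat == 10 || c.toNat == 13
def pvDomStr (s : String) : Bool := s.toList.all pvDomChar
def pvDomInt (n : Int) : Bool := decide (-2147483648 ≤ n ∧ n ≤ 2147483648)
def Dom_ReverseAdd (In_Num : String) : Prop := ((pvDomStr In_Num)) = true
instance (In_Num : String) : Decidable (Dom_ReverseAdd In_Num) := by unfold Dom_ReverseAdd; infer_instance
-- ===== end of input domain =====

-- B replaces A's per-digit positional accumulation (digit * 10**n with an in-loop early
-- return) by a separate validation pass followed by a Horner fold over the reversed string;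
-- objective: simpler (shorter, no power computation). Return value only; no mutation.

-- Shared port of the library call "{:,}".format(n) (thousands separators on an int),
-- used literally by both Pythons. pvChunk3 groups a REVERSED digit list in threes.
def pvChunk3 : List Char → List Char
  | a :: b :: c :: d :: rest => a :: b :: c :: ',' :: pvChunk3 (d :: rest)
  | l => l

def pvCommaFmt (n : Int) : String :=
  match PySem.Int.toChars n with
  | '-' :: ds => String.ofList ('-' :: (pvChunk3 ds.reverse).reverse)
  | ds => String.ofList ((pvChunk3 ds.reverse).reverse)

-- ===== PORT A =====
-- the for-loop of A: state (Sum, n); early return "err" on a non-digit char.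
-- int(i) on a digit char i is exactly (i.toNat-48); int(In_Num) is PySem.Int.ofStr?
-- (none = ValueError, excluded by Pre_; the "" sentinel is never returned inside Pre_).
def ReverseAddLoop (s : String) : List Char → Int → Nat → String
  | [], sum, _ =>
      match PySem.Int.ofStr? s with
      | some v => pvCommaFmt (sum + v)
      | none => ""
  | i :: rest, sum, n =>
      if '9' < i ∨ i < '0' then "err"
      else ReverseAddLoop s rest (sum + ((i.toNat : Int) - 48) * 10 ^ n) (n + 1)

def ReverseAdd (In_Num : String) : String :=
  ReverseAddLoop In_Num In_Num.toList 0 0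

-- ===== PORT B =====
def ReverseAdd_alt (In_Num : String) : String :=
  if In_Num.toList.any (fun c => decide (c < '0') || decide ('9' < c)) then "err"
  else
    let rev := In_Num.toList.reverse.foldl (fun acc c => acc * 10 + ((c.toNat : Int) - 48)) 0
    match PySem.Int.ofStr? In_Num with
    | some v => pvCommaFmt (rev + v)
    | none => ""

-- ===== PRECONDITION & SPEC =====
-- Pre_ excludes only the empty string, on which Python A raises ValueError (int('')).
def Pre_ReverseAdd (In_Num : String) : Prop := In_Num ≠ ""
instance (In_Num : String) : Decidable (Pre_ReverseAdd In_Num) := by unfold Pre_ReverseAdd; infer_instance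

def pvWitness_ReverseAdd : String := "12"

def Spec_ReverseAdd (In_Num : String) (out : String) : Prop := out = ReverseAdd_alt In_Num
instance (In_Num : String) (out : String) : Decidable (Spec_ReverseAdd In_Num out) := by unfold Spec_ReverseAdd; infer_instance

-- ===== CLAIM (what is proved, stated in full; the proofs are below) =====
def Claim_equal_ReverseAdd : Prop := ∀ (In_Num : String), Dom_ReverseAdd In_Num → Pre_ReverseAdd In_Num → Spec_ReverseAdd In_Num (ReverseAdd In_Num)

-- ===== LEMMAS AND PROOFS =====

-- if some char fails A's digit test, the loop returns "err"
theorem ReverseAddLoop_err (s : String) (l : List Char) (sum : Int) (n : Nat)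
    (h : l.any (fun c => decide (c < '0') || decide ('9' < c)) = true) :
    ReverseAddLoop s l sum n = "err" := by
  induction l generalizing sum n with
  | nil => simp at h
  | cons c rest ih =>
      by_cases hc : '9' < c ∨ c < '0'
      · simp [ReverseAddLoop, hc]
      · push Not at hc
        simp only [List.any_cons, Bool.or_eq_true, decide_eq_true_eq] at h
        rcases h with h | h
        · rcases h with h | h
          · exact absurd h (not_lt.mpr hc.2)
          · exact absurd h (not_lt.mpr hc.1)
        · have : ¬ ('9' < c ∨ c < '0') := by
            intro hx; rcases hx with hx | hx
            · exact absurd hx (not_lt.mpr hc.1)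
            · exact absurd hx (not_lt.mpr hc.2)
          simp only [ReverseAddLoop, if_neg this]
          exact ih _ _ (by simpa using h)

-- when every char is a digit, the loop accumulates exactly sum + 10^n * Horner(l.reverse)
theorem ReverseAddLoop_ok (s : String) (l : List Char) (sum : Int) (n : Nat)
    (h : l.any (fun c => decide (c < '0') || decide ('9' < c)) = false) :
    ReverseAddLoop s l sum n =
      match PySem.Int.ofStr? s with
      | some v => pvCommaFmt (sum + 10 ^ n *
          (l.reverse.foldl (fun acc c => acc * 10 + ((c.toNat : Int) - 48)) 0) + v)
      | none => "" := by
  induction l generalizing sum n with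
  | nil => simp [ReverseAddLoop]
  | cons c rest ih =>
      simp only [List.any_cons, Bool.or_eq_false_iff, decide_eq_false_iff_not, not_lt] at h
      have hc : ¬ ('9' < c ∨ c < '0') := by
        intro hx; rcases hx with hx | hx
        · exact absurd hx (not_lt.mpr h.1.2)
        · exact absurd hx (not_lt.mpr h.1.1)
      simp only [ReverseAddLoop, if_neg hc]
      rw [ih _ _ (by simpa using h.2)]
      have harith : sum + ((c.toNat : Int) - 48) * 10 ^ n + 10 ^ (n + 1) *
            (rest.reverse.foldl (fun acc c => acc * 10 + ((c.toNat : Int) - 48)) 0)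
          = sum + 10 ^ n *
            ((c :: rest).reverse.foldl (fun acc c => acc * 10 + ((c.toNat : Int) - 48)) 0) := by
        simp only [List.reverse_cons, List.foldl_append, List.foldl_cons, List.foldl_nil]
        ring
      rw [harith]

-- ===== VERDICT (by name: the statement is the Claim_ definition above) =====
theorem ReverseAdd_spec : Claim_equal_ReverseAdd := by
  intro s _ _
  unfold Spec_ReverseAdd ReverseAdd ReverseAdd_alt
  cases hany : s.toList.any (fun c => decide (c < '0') || decide ('9' < c)) with
  | true =>
      rw [ReverseAddLoop_err s _ 0 0 hany]
      simp
  | false =>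
      rw [ReverseAddLoop_ok s _ 0 0 hany]
      simp only [Bool.false_eq_true, if_false]
      cases PySem.Int.ofStr? s with
      | none => rfl
      | some v => simp
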